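-- pv_equiv track=rewrite | github.com/stevenwtolbert/erdos-710-analysis | experiments/graph_theoretic/hpc_z41_descent_chains.py | get_dyadic_intervals
-- ===== SOURCE A (Python) =====
-- from math import gcd, log, sqrt, exp, floor, ceil, log2
--
-- def get_dyadic_intervals(B, N):
--     lo = B + 1
--     hi = N
--     intervals = []
--     j = int(log2(lo)) if lo > 0 else 0
--     while (1 << j) <= hi:
--         ivl_lo = max(lo, 1 << j)
--         ivl_hi = min(hi, (1 << (j + 1)) - 1)
--         if ivl_lo <= ivl_hi:
--             intervals.append((j, ivl_lo, ivl_hi))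
--         j += 1
--     return intervals
-- ===== SOURCE B (Python) =====
-- def get_dyadic_intervals(B, N):
--     lo = max(B + 1, 1)
--     if N < lo:
--         return []
--
--     def build(j, hi):
--         if j < 0:
--             return []
--         start = max(lo, 1 << j)
--         if start > hi:
--             return []
--         return build(j - 1, start - 1) + [(j, start, hi)]
--
--     return build(N.bit_length() - 1, N)
-- ===== Notes on version B (the rewrite author's own statement) =====
-- stated objective: alternative
-- what changed: Replaces A's upward level-counter loop (increment j through every dyadic level, testing each candidate interval for emptiness) with a top-down recursion that starts at N's highest dyadic block via bit_length, peels off the topmost interval, and recurses below it, building the list back-to-front by concatenation with an early empty-range return instead of a per-level emptiness test.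
import Mathlib
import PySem

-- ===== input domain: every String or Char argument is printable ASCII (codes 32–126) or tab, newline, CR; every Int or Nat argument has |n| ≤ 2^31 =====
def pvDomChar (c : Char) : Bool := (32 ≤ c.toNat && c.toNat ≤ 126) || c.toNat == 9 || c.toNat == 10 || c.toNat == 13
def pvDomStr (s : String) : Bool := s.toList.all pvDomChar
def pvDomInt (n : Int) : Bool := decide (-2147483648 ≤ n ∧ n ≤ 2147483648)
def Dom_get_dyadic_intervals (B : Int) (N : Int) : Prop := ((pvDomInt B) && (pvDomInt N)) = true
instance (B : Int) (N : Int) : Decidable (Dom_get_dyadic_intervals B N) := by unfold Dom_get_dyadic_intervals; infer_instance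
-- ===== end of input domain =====

-- B replaces A's upward level scan (counter j with an emptiness test per level) by a
-- top-down recursion on the highest dyadic block, building the list back-to-front;
-- objective: alternative decomposition, same asymptotic cost.
-- Python's float `int(log2(lo))` (A) is ported as the exact floor log2 `Nat.log 2`,
-- which agrees with it for 1 ≤ lo ≤ 2^31 (the Dom range); B's `N.bit_length() - 1`
-- on N ≥ 1 is likewise `Nat.log 2 N.toNat`.

-- ===== PORT A =====
-- while (1 << j) <= hi: append (j, max(lo,2^j), min(hi,2^(j+1)-1)) if nonempty; j += 1
def pvLoopA (hi lo : Int) (j : Nat) : List (Int × Int × Int) :=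
  if (2:Int)^j ≤ hi then
    (if max lo ((2:Int)^j) ≤ min hi ((2:Int)^(j+1) - 1) then
        [((j : Int), max lo ((2:Int)^j), min hi ((2:Int)^(j+1) - 1))]
      else []) ++ pvLoopA hi lo (j+1)
  else []
termination_by (hi + 1 - (2:Int)^j).toNat
decreasing_by
  have h1 : (0:Int) < 2^j := pow_pos (by norm_num) j
  omega

def get_dyadic_intervals (B : Int) (N : Int) : List (Int × Int × Int) :=
  pvLoopA N (B + 1) (if B + 1 > 0 then Nat.log 2 (B + 1).toNat else 0)

-- ===== PORT B =====
-- def build(j, hi): if j < 0: []; start = max(lo, 1 << j);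
--   if start > hi: []; else build(j-1, start-1) + [(j, start, hi)]
def pvBuildB (lo : Int) (j : Int) (hi : Int) : List (Int × Int × Int) :=
  if j < 0 then []
  else if max lo ((2:Int)^j.toNat) > hi then []
  else pvBuildB lo (j - 1) (max lo ((2:Int)^j.toNat) - 1)
        ++ [(j, max lo ((2:Int)^j.toNat), hi)]
termination_by (j + 1).toNat
decreasing_by omega

def get_dyadic_intervals_alt (B : Int) (N : Int) : List (Int × Int × Int) :=
  if N < max (B + 1) 1 then []
  else pvBuildB (max (B + 1) 1) ((Nat.log 2 N.toNat : Nat) : Int) N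

-- ===== PRECONDITION & SPEC =====
def Spec_get_dyadic_intervals (B : Int) (N : Int) (out : List (Int × Int × Int)) : Prop := out = get_dyadic_intervals_alt B N
instance (B : Int) (N : Int) (out : List (Int × Int × Int)) : Decidable (Spec_get_dyadic_intervals B N out) := by unfold Spec_get_dyadic_intervals; infer_instance

-- ===== CLAIM =====
def Claim_equal_get_dyadic_intervals : Prop := ∀ (B : Int) (N : Int), Dom_get_dyadic_intervals B N → Spec_get_dyadic_intervals B N (get_dyadic_intervals B N)

-- ===== LEMMAS AND PROOFS =====

-- The starting lower bound only matters through max with 2^j: any lo ≤ 2^j gives the same run.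
lemma pvLoopA_congr (hi : Int) (j : Nat) (lo lo' : Int)
    (h : lo ≤ 2^j) (h' : lo' ≤ 2^j) : pvLoopA hi lo j = pvLoopA hi lo' j := by
  have h1 : (0:Int) < 2^j := pow_pos (by norm_num) j
  have h2 : (2:Int)^(j+1) = 2^j * 2 := pow_succ 2 j
  by_cases hcond : (2:Int)^j ≤ hi
  · conv_lhs => rw [pvLoopA]
    conv_rhs => rw [pvLoopA]
    rw [if_pos hcond, if_pos hcond, max_eq_right h, max_eq_right h',
        pvLoopA_congr hi (j+1) lo lo' (by omega) (by omega)]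
  · conv_lhs => rw [pvLoopA]
    conv_rhs => rw [pvLoopA]
    rw [if_neg hcond, if_neg hcond]
termination_by (hi + 1 - (2:Int)^j).toNat
decreasing_by omega

-- A's scan from level j up to the top level jt splits off the topmost interval.
lemma pvLoopA_split (lo hi : Int) (j jt : Nat)
    (h2 : 2^j ≤ lo) (h3 : lo ≤ 2^(j+1) - 1) (h4 : j ≤ jt)
    (h5 : 2^jt ≤ hi) (h6 : hi ≤ 2^(jt+1) - 1) (h7 : lo ≤ hi) :
    pvLoopA hi lo j
      = pvLoopA ((2:Int)^jt - 1) lo j ++ [((jt : Int), max lo ((2:Int)^jt), hi)] := by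
  have hj1 : (0:Int) < 2^j := pow_pos (by norm_num) j
  have hjs : (2:Int)^(j+1) = 2^j * 2 := pow_succ 2 j
  rcases Nat.eq_or_lt_of_le h4 with heq | hlt
  · -- j = jt : the scan has exactly one interval left
    subst heq
    conv_lhs => rw [pvLoopA]
    rw [if_pos (le_trans h2 h7), max_eq_left h2, min_eq_left h6, if_pos h7,
        show pvLoopA hi lo (j+1) = [] from by rw [pvLoopA, if_neg (by omega)],
        show pvLoopA ((2:Int)^j - 1) lo j = [] from by rw [pvLoopA, if_neg (by omega)]]
    simp
  · -- j < jt : both sides emit level j's interval, recurse at j+1 with lo normalised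
    have hjt : (2:Int)^(j+1) ≤ 2^jt := by
      exact_mod_cast pow_le_pow_right₀ (by norm_num : (1:Int) ≤ 2) hlt
    have hjts : (2:Int)^(jt+1) = 2^jt * 2 := pow_succ 2 jt
    have hjtpos : (0:Int) < 2^jt := pow_pos (by norm_num) jt
    conv_lhs => rw [pvLoopA]
    conv_rhs => rw [pvLoopA]
    rw [if_pos (by omega : (2:Int)^j ≤ hi), if_pos (by omega : (2:Int)^j ≤ 2^jt - 1),
        max_eq_left h2, min_eq_right (by omega : (2:Int)^(j+1) - 1 ≤ hi),
        min_eq_right (by omega : (2:Int)^(j+1) - 1 ≤ 2^jt - 1),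
        if_pos (by omega : lo ≤ (2:Int)^(j+1) - 1),
        pvLoopA_congr hi (j+1) lo ((2:Int)^(j+1)) (by omega) le_rfl,
        pvLoopA_congr ((2:Int)^jt - 1) (j+1) lo ((2:Int)^(j+1)) (by omega) le_rfl,
        pvLoopA_split ((2:Int)^(j+1)) hi (j+1) jt le_rfl (by omega) hlt h5 h6 (by omega),
        max_eq_right (by omega : lo ≤ (2:Int)^jt),
        max_eq_right (by omega : (2:Int)^(j+1) ≤ 2^jt)]
    simp
termination_by jt - j
decreasing_by omega

-- floor-log2 bounds, Int form
lemma pvLogBounds (x : Int) (hx : 1 ≤ x) :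
    (2:Int)^(Nat.log 2 x.toNat) ≤ x ∧ x ≤ (2:Int)^(Nat.log 2 x.toNat + 1) - 1 := by
  have hne : x.toNat ≠ 0 := by omega
  have hp := Nat.pow_log_le_self 2 hne
  have hq := Nat.lt_pow_succ_log_self (by norm_num : 1 < 2) x.toNat
  have hc : ((2^(Nat.log 2 x.toNat) : Nat) : Int) = (2:Int)^(Nat.log 2 x.toNat) := by
    push_cast; ring
  have hc2 : ((2^(Nat.log 2 x.toNat + 1) : Nat) : Int) = (2:Int)^(Nat.log 2 x.toNat + 1) := by
    push_cast; ring
  omega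

-- Main: A's level scan equals B's top-down recursion when j is lo's level and jt is hi's.
lemma loop_eq_build (lo hi : Int) (j0 jt : Nat)
    (h2 : 2^j0 ≤ lo) (h3 : lo ≤ 2^(j0+1) - 1) (h4 : j0 ≤ jt)
    (h5 : 2^jt ≤ hi) (h6 : hi ≤ 2^(jt+1) - 1) (h7 : lo ≤ hi) :
    pvLoopA hi lo j0 = pvBuildB lo ((jt : Nat) : Int) hi := by
  have hj0 : (0:Int) < 2^j0 := pow_pos (by norm_num) j0
  have hjtpos : (0:Int) < 2^jt := pow_pos (by norm_num) jt
  have htn : ((jt : Int)).toNat = jt := by omega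
  rw [pvLoopA_split lo hi j0 jt h2 h3 h4 h5 h6 h7]
  rw [pvBuildB, if_neg (by omega : ¬ ((jt:Int) < 0)), htn,
      if_neg (by omega : ¬ max lo ((2:Int)^jt) > hi)]
  congr 1
  rcases Nat.eq_or_lt_of_le h4 with heq | hlt
  · -- jt = j0: both remainders are empty
    subst heq
    rw [max_eq_left h2, pvLoopA, if_neg (by omega)]
    by_cases hz : j0 = 0
    · subst hz; rw [pvBuildB, if_pos (by omega)]
    · have hstep : (2:Int)^(j0-1+1) = 2^(j0-1) * 2 := pow_succ 2 (j0-1)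
      have hpe : j0 - 1 + 1 = j0 := by omega
      rw [hpe] at hstep
      have hppos : (0:Int) < 2^(j0-1) := pow_pos (by norm_num) (j0-1)
      rw [pvBuildB, if_neg (by omega : ¬ ((j0:Int) - 1 < 0)),
          if_pos (by
            have : ((j0:Int) - 1).toNat = j0 - 1 := by omega
            rw [this]; omega)]
  · -- jt > j0: recurse one block down
    have hjs : (2:Int)^(j0+1) = 2^j0 * 2 := pow_succ 2 j0
    have hjt : (2:Int)^(j0+1) ≤ 2^jt := by
      exact_mod_cast pow_le_pow_right₀ (by norm_num : (1:Int) ≤ 2) hlt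
    have hjtm : (2:Int)^(jt-1+1) = 2^(jt-1) * 2 := pow_succ 2 (jt-1)
    have hpe : jt - 1 + 1 = jt := by omega
    rw [hpe] at hjtm
    have hjtmpos : (0:Int) < 2^(jt-1) := pow_pos (by norm_num) (jt-1)
    have hcast : ((jt : Int) - 1) = ((jt - 1 : Nat) : Int) := by omega
    rw [max_eq_right (by omega : lo ≤ (2:Int)^jt), hcast,
        ← loop_eq_build lo ((2:Int)^jt - 1) j0 (jt-1) h2 h3 (by omega)
            (by omega) (by omega) (by omega)]
termination_by jt
decreasing_by omega

-- ===== VERDICT =====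
theorem get_dyadic_intervals_spec : Claim_equal_get_dyadic_intervals := by
  intro B N _
  unfold Spec_get_dyadic_intervals get_dyadic_intervals get_dyadic_intervals_alt
  by_cases hN : N < max (B + 1) 1
  · -- empty result: A's scan emits nothing
    rw [if_pos hN]
    by_cases hpos : B + 1 > 1
    · rw [if_pos (by omega : B + 1 > 0)]
      obtain ⟨hlow, hhigh⟩ := pvLogBounds (B + 1) (by omega)
      have hjs : (2:Int)^(Nat.log 2 (B + 1).toNat + 1)
          = 2^(Nat.log 2 (B + 1).toNat) * 2 := pow_succ 2 _
      by_cases hc2 : (2:Int)^(Nat.log 2 (B + 1).toNat) ≤ N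
      · rw [pvLoopA, if_pos hc2, if_neg (by omega),
            show pvLoopA N (B + 1) (Nat.log 2 (B + 1).toNat + 1) = [] from by
              rw [pvLoopA, if_neg (by omega)]]
        simp
      · rw [pvLoopA, if_neg hc2]
    · have hstart : (if B + 1 > 0 then Nat.log 2 (B + 1).toNat else 0) = 0 := by
        by_cases h0 : B + 1 > 0
        · rw [if_pos h0]
          have h1 : (B + 1).toNat = 1 := by omega
          simp [h1]
        · rw [if_neg h0]
      rw [hstart, pvLoopA, if_neg (by norm_num; omega)]
  · -- nonempty range: apply the main lemma with jt = log2 N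
    rw [if_neg hN]
    obtain ⟨h5, h6⟩ := pvLogBounds N (by omega)
    by_cases hpos : B + 1 > 1
    · rw [if_pos (by omega : B + 1 > 0),
          show max (B + 1) 1 = B + 1 from by omega]
      obtain ⟨h2, h3⟩ := pvLogBounds (B + 1) (by omega)
      have h4 : Nat.log 2 (B + 1).toNat ≤ Nat.log 2 N.toNat := by
        by_contra hlt
        have hjt : (2:Int)^(Nat.log 2 N.toNat + 1) ≤ 2^(Nat.log 2 (B + 1).toNat) := by
          exact_mod_cast pow_le_pow_right₀ (by norm_num : (1:Int) ≤ 2) (by omega)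
        omega
      exact loop_eq_build (B + 1) N _ _ h2 h3 h4 h5 h6 (by omega)
    · have hstart : (if B + 1 > 0 then Nat.log 2 (B + 1).toNat else 0) = 0 := by
        by_cases h0 : B + 1 > 0
        · rw [if_pos h0]
          have h1 : (B + 1).toNat = 1 := by omega
          simp [h1]
        · rw [if_neg h0]
      rw [hstart, show max (B + 1) 1 = 1 from by omega,
          pvLoopA_congr N 0 (B + 1) 1 (by norm_num; omega) (by norm_num)]
      exact loop_eq_build 1 N 0 _ (by norm_num) (by norm_num) (by omega) h5 h6 (by omega)
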